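-- pv_equiv track=rewrite | github.com/Crewjah/AI-Resume-Analyzer | api/analyzer.py | _format_skills_for_display
-- ===== SOURCE A (Python) =====
-- from typing import Dict, List, Any
--
-- def _format_skills_for_display(skills: List[Dict]) -> Dict[str, List[str]]:
--     """Format skills data for UI display"""
--     formatted_skills = {}
--
--     for skill in skills:
--         category = skill.get('category', 'Other')
--         if category not in formatted_skills:
--             formatted_skills[category] = []
--         formatted_skills[category].append(skill['name'])
--
--     return formatted_skills
-- ===== SOURCE B (Python) =====
-- def _format_skills_for_display(skills):
--     """Format skills data for UI display (two-pass: distinct categories, then gather names)."""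
--     cats = list(dict.fromkeys(s.get('category', 'Other') for s in skills))
--     return {c: [s['name'] for s in skills if s.get('category', 'Other') == c]
--             for c in cats}
-- ===== Notes on version B (the rewrite author's own statement) =====
-- stated objective: alternative
-- what changed: Replaces the single incremental accumulate-into-dict pass by a two-pass scheme: first the distinct categories in first-occurrence order via dict.fromkeys, then one dict comprehension gathering each category's names with a filtered scan.
import Mathlib
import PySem

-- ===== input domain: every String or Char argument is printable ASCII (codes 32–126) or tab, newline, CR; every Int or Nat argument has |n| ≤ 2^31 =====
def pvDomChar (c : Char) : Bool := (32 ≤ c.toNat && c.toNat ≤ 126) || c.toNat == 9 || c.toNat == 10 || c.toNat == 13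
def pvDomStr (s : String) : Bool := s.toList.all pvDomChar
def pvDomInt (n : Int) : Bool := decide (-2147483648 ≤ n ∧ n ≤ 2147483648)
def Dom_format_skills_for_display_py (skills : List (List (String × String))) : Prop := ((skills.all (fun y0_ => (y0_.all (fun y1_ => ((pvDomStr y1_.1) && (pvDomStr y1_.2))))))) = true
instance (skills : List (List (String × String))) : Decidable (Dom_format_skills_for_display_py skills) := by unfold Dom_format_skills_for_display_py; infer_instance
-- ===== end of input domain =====

-- B replaces A's single accumulate-into-dict pass by two passes (distinct categories, then a
-- filtered scan per category); same return value, no speed claim.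

-- ===== PORT A =====
-- skill.get('category', 'Other')
def pvKeyOf (s : List (String × String)) : String := (PySem.Dict.mk s).getD "category" "Other"
-- skill['name']; Pre_ guarantees the key is present, so the default is never consulted
def pvNameOf (s : List (String × String)) : String := (PySem.Dict.mk s).getD "name" ""

def format_skills_for_display_py (skills : List (List (String × String))) : List (String × List String) :=
  (skills.foldl (fun formatted skill =>
      let category := pvKeyOf skill
      let formatted := if formatted.contains category then formatted
                       else formatted.insert category ([] : List String)
      formatted.modify category [] (fun l => l ++ [pvNameOf skill]))
    PySem.Dict.empty).items

-- ===== PORT B =====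
def format_skills_for_display_py_alt (skills : List (List (String × String))) : List (String × List String) :=
  let cats := PySem.Set.ofList (skills.map pvKeyOf)
  cats.map (fun c => (c, (skills.filter (fun s => pvKeyOf s == c)).map pvNameOf))

-- ===== PRECONDITION & SPEC =====
-- Pre_ excludes exactly the inputs where a skill dict lacks the 'name' key: Python A raises KeyError there.
def Pre_format_skills_for_display_py (skills : List (List (String × String))) : Prop :=
  (skills.all (fun s => (PySem.Dict.mk s).contains "name")) = true
instance (skills : List (List (String × String))) : Decidable (Pre_format_skills_for_display_py skills) := by unfold Pre_format_skills_for_display_py; infer_instance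
def pvWitness_format_skills_for_display_py : (List (List (String × String))) :=
  [[("name", "Python"), ("category", "Tech")], [("name", "Teamwork")]]

def Spec_format_skills_for_display_py (skills : List (List (String × String))) (out : List (String × List String)) : Prop := out = format_skills_for_display_py_alt skills
instance (skills : List (List (String × String))) (out : List (String × List String)) : Decidable (Spec_format_skills_for_display_py skills out) := by unfold Spec_format_skills_for_display_py; infer_instance

-- ===== CLAIM (what is proved, stated in full; the proofs are below) =====
def Claim_equal_format_skills_for_display_py : Prop := ∀ (skills : List (List (String × String))), Dom_format_skills_for_display_py skills → Pre_format_skills_for_display_py skills → Spec_format_skills_for_display_py skills (format_skills_for_display_py skills)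

-- ===== LEMMAS AND PROOFS =====

-- A's "ensure key, then append" step is one Dict.modify.
theorem pv_step_eq (d : PySem.Dict String (List String)) (c : String) (n : String) :
    (if d.contains c then d else d.insert c ([] : List String)).modify c [] (fun l => l ++ [n])
      = d.modify c [] (fun l => l ++ [n]) := by
  by_cases h : d.contains c = true
  · simp [h]
  · simp only [Bool.not_eq_true] at h
    have hg : d.getD c ([] : List String) = [] := by
      exact PySem.Dict.getD_of_not_contains (d := d) (k := c) (d0 := ([] : List String)) (h := h)
    simp [h, PySem.Dict.modify, PySem.Dict.getD_insert_self,
      PySem.Dict.insert_insert_self, hg]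

theorem pv_foldA_eq (skills : List (List (String × String))) :
    (skills.foldl (fun formatted skill =>
        let category := pvKeyOf skill
        let formatted := if formatted.contains category then formatted
                         else formatted.insert category ([] : List String)
        formatted.modify category [] (fun l => l ++ [pvNameOf skill]))
      PySem.Dict.empty)
    = skills.foldl (fun d s => d.modify (pvKeyOf s) [] (fun l => l ++ [pvNameOf s])) PySem.Dict.empty := by
  congr 1
  funext d s
  exact pv_step_eq d (pvKeyOf s) (pvNameOf s)

theorem pv_getD_fold (skills : List (List (String × String))) (c : String) :
    (skills.foldl (fun d s => d.modify (pvKeyOf s) [] (fun l => l ++ [pvNameOf s]))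
        PySem.Dict.empty).getD c []
      = (skills.filter (fun s => pvKeyOf s == c)).map pvNameOf := by
  have h := PySem.Dict.getD_foldl_modify_append
      (skills.map (fun s => (pvKeyOf s, pvNameOf s))) PySem.Dict.empty c
  rw [List.foldl_map] at h
  simpa [List.filter_map, Function.comp, List.map_map] using h

theorem format_skills_equal (skills : List (List (String × String))) :
    format_skills_for_display_py skills = format_skills_for_display_py_alt skills := by
  unfold format_skills_for_display_py format_skills_for_display_py_alt
  rw [pv_foldA_eq]
  set D := skills.foldl (fun d s => d.modify (pvKeyOf s) [] (fun l => l ++ [pvNameOf s]))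
      PySem.Dict.empty with hD
  have hnd : D.keys.Nodup := by
    rw [hD]
    exact PySem.Dict.nodup_keys_foldl_modify_key skills pvKeyOf []
      (fun d s l => l ++ [pvNameOf s]) PySem.Dict.empty (by simp)
  have hkeys : D.keys = PySem.Set.ofList (skills.map pvKeyOf) := by
    rw [hD, PySem.Dict.keys_foldl_modify_key skills pvKeyOf []
      (fun d s l => l ++ [pvNameOf s]) PySem.Dict.empty]
    simp [PySem.Dict.keys_empty, PySem.Set.update_nil_left]
  rw [PySem.Dict.items_eq_map_keys D hnd ([] : List String), hkeys]
  refine List.map_congr_left (fun c _ => ?_)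
  rw [hD, pv_getD_fold]

-- ===== VERDICT (by name: the statement is the Claim_ definition above) =====
theorem format_skills_for_display_py_spec : Claim_equal_format_skills_for_display_py := by
  intro skills _ _
  unfold Spec_format_skills_for_display_py
  exact format_skills_equal skills
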